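-- pv_equiv track=rewrite | github.com/pvtrov/algorithms-and-data-structures | exercises_from_course/to_exams_/2020_21/final_coll_1/zad2_breaking.py | give_me_right_vertex
-- ===== SOURCE A (Python) =====
-- from queue import PriorityQueue
--
-- def count_edges(graph, vertexs):
--     edges_number = PriorityQueue()
--
--     for vertex in vertexs:
--         counter = 0
--         for j in range(len(graph)):
--             if graph[vertex][j] == 1:
--                 counter += 1
--         edges_number.put((-counter, vertex))
--
--     _, result = edges_number.get()
--     return result
--
-- def give_me_right_vertex(graph, bridges):
--     ver_number = [0] * len(graph)
--
--     for edge in bridges: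
--         ver_number[edge[0]] += 1
--         ver_number[edge[1]] += 1
--
--     max_vert = []
--     max_ = max(ver_number)
--
--     for i in range(len(ver_number)):
--         if ver_number[i] == max_:
--             max_vert.append(i)
--
--     if len(max_vert) == 1:
--         return max_vert[0]
--     else:
--         return count_edges(graph, max_vert)
-- ===== SOURCE B (Python) =====
-- def give_me_right_vertex(graph, bridges):
--     n = len(graph)
--     ver = [0] * n
--     for e in bridges:
--         ver[e[0]] += 1
--         ver[e[1]] += 1
--     best = 0
--     for v in range(1, n):
--         key = (ver[v], sum(1 for j in range(n) if graph[v][j] == 1))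
--         if key > (ver[best], sum(1 for j in range(n) if graph[best][j] == 1)):
--             best = v
--     return best
-- ===== Notes on version B (the rewrite author's own statement) =====
-- stated objective: simpler
-- what changed: Replaces A's max-then-collect-ties-then-PriorityQueue selection with a single running argmax over all vertices under the lexicographic key (bridge-endpoint count, adjacency-row degree), with no candidate list and no queue.
-- outside the precondition, e.g. on give_me_right_vertex([[1, 1], [1]], [[0, 0]]): A returns 0, B raises IndexError
import Mathlib
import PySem

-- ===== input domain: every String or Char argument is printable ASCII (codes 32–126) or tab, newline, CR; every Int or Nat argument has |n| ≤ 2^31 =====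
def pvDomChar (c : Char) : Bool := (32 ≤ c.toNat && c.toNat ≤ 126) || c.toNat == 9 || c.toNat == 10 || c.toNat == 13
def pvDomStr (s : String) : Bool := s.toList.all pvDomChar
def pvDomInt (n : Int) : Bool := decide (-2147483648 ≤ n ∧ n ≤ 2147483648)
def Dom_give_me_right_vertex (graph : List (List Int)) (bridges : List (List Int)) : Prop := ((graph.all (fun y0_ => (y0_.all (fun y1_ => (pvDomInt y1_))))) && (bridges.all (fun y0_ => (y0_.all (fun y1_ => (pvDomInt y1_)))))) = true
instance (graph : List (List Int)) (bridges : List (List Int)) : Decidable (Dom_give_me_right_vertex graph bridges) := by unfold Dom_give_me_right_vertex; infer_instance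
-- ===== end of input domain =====

-- B replaces A's max / collect-ties / PriorityQueue selection by one running argmax under the
-- lexicographic key (bridge-endpoint count, adjacency-row degree); return values proved equal on Pre_.

-- ===== PORT A =====
-- Python tuple comparison p < q (used by the PriorityQueue ordering and by B's key comparison)
def pvLt (p q : Int × Int) : Bool :=
  decide (p.1 < q.1) || (decide (p.1 = q.1) && decide (p.2 < q.2))

-- the two identical lines 'ver_number[edge[0]] += 1; ver_number[edge[1]] += 1' (both Pythons run them verbatim)
def pvBump (ver : List Int) (e : List Int) : List Int :=
  let i0 := PySem.List.pyGetD e 0 0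
  let v1 := PySem.List.pySetD ver i0 (PySem.List.pyGetD ver i0 0 + 1)
  let i1 := PySem.List.pyGetD e 1 0
  PySem.List.pySetD v1 i1 (PySem.List.pyGetD v1 i1 0 + 1)

-- the bridge-endpoint counting loop, shared verbatim by both Pythons
def pvVer (graph bridges : List (List Int)) : List Int :=
  bridges.foldl pvBump (List.replicate graph.length 0)

-- 'for j in range(len(graph)): if graph[v][j] == 1: counter += 1' (A's counter loop = B's sum(...))
def pvDeg (graph : List (List Int)) (v : Int) : Int :=
  (PySem.List.pyRange 0 (graph.length : Int) 1).foldl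
    (fun c j => if PySem.List.pyGetD (PySem.List.pyGetD graph v []) j 0 = 1 then c + 1 else c) 0

-- count_edges: put (-counter, vertex) for each vertex, then get the smallest tuple
def pvCountEdges (graph : List (List Int)) (vertexs : List Int) : Int :=
  let entries := vertexs.foldl (fun acc v => acc ++ [(-(pvDeg graph v), v)]) ([] : List (Int × Int))
  match entries with
  | [] => 0   -- unreachable under Pre_: the candidate list is nonempty
  | e :: rest => (rest.foldl (fun best p => if pvLt p best then p else best) e).2

def give_me_right_vertex (graph : List (List Int)) (bridges : List (List Int)) : Int :=
  let ver := pvVer graph bridges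
  let m := (PySem.List.max? ver (fun x => x)).getD 0   -- max(ver_number); Pre_ makes ver nonempty
  let maxVert := (PySem.List.pyRange 0 (PySem.List.len ver) 1).foldl
      (fun acc i => if PySem.List.pyGetD ver i 0 = m then acc ++ [i] else acc) []
  if maxVert.length = 1 then PySem.List.pyGetD maxVert 0 0
  else pvCountEdges graph maxVert

-- ===== PORT B =====
-- key (ver[v], degree(v)) of Source B
def pvKey (graph : List (List Int)) (ver : List Int) (v : Int) : Int × Int :=
  (PySem.List.pyGetD ver v 0, pvDeg graph v)

def give_me_right_vertex_alt (graph : List (List Int)) (bridges : List (List Int)) : Int :=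
  let ver := pvVer graph bridges
  (PySem.List.pyRange 1 (graph.length : Int) 1).foldl
    (fun best v => if pvLt (pvKey graph ver best) (pvKey graph ver v) then v else best) 0

-- ===== PRECONDITION & SPEC =====
-- Pre_ excludes: empty graphs and edges with an out-of-range endpoint or fewer than two entries
-- (A raises there), and graphs with a row shorter than len(graph): B reads every row's degree while
-- A only reads rows of tied vertices, so A returns on some such ragged inputs where B raises.
def Pre_give_me_right_vertex (graph : List (List Int)) (bridges : List (List Int)) : Prop :=
  graph ≠ [] ∧
  (∀ row ∈ graph, graph.length ≤ row.length) ∧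
  (∀ e ∈ bridges, 2 ≤ e.length ∧
    PySem.Raise.InRange graph.length (PySem.List.pyGetD e 0 0) ∧
    PySem.Raise.InRange graph.length (PySem.List.pyGetD e 1 0))
instance (graph : List (List Int)) (bridges : List (List Int)) : Decidable (Pre_give_me_right_vertex graph bridges) := by unfold Pre_give_me_right_vertex; infer_instance

def pvWitness_give_me_right_vertex : List (List Int) × List (List Int) :=
  ([[0, 1], [1, 0]], [[0, 1]])

def Spec_give_me_right_vertex (graph : List (List Int)) (bridges : List (List Int)) (out : Int) : Prop := out = give_me_right_vertex_alt graph bridges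
instance (graph : List (List Int)) (bridges : List (List Int)) (out : Int) : Decidable (Spec_give_me_right_vertex graph bridges out) := by unfold Spec_give_me_right_vertex; infer_instance

-- ===== CLAIM (what is proved, stated in full; the proofs are below) =====
def Claim_equal_give_me_right_vertex : Prop := ∀ (graph : List (List Int)) (bridges : List (List Int)), Dom_give_me_right_vertex graph bridges → Pre_give_me_right_vertex graph bridges → Spec_give_me_right_vertex graph bridges (give_me_right_vertex graph bridges)

-- ===== LEMMAS AND PROOFS =====

theorem pvLt_irrefl (a : Int × Int) : pvLt a a = false := by
  simp [pvLt]

theorem pvLt_trans {a b c : Int × Int} (h1 : pvLt a b = true) (h2 : pvLt b c = true) :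
    pvLt a c = true := by
  obtain ⟨a1, a2⟩ := a; obtain ⟨b1, b2⟩ := b; obtain ⟨c1, c2⟩ := c
  simp [pvLt] at *; omega

theorem pvLt_of_not_of_lt {e q r : Int × Int} (h1 : pvLt q e = false) (h2 : pvLt q r = true) :
    pvLt e r = true := by
  obtain ⟨a1, a2⟩ := e; obtain ⟨b1, b2⟩ := q; obtain ⟨c1, c2⟩ := r
  simp [pvLt] at *; omega

theorem pvBump_length (ver : List Int) (e : List Int) : (pvBump ver e).length = ver.length := by
  simp [pvBump, PySem.List.length_pySetD]

theorem pvFoldBump_length (bridges : List (List Int)) :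
    ∀ init : List Int, (bridges.foldl pvBump init).length = init.length := by
  induction bridges with
  | nil => intro init; simp
  | cons e t ih => intro init; simpa [pvBump_length] using ih (pvBump init e)

theorem pvVer_length (graph bridges : List (List Int)) :
    (pvVer graph bridges).length = graph.length := by
  simpa using pvFoldBump_length bridges (List.replicate graph.length 0)

-- A's PriorityQueue: the fold keeps the tuple-minimum of e :: l
theorem pvMinFold_spec (l : List (Int × Int)) (e : Int × Int) :
    (l.foldl (fun best p => if pvLt p best then p else best) e) ∈ e :: l ∧
    ∀ p ∈ e :: l, pvLt p (l.foldl (fun best p => if pvLt p best then p else best) e) = false := by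
  induction l generalizing e with
  | nil =>
    refine ⟨by simp, ?_⟩
    intro p hp; simp at hp; subst hp; exact pvLt_irrefl _
  | cons q t ih =>
    obtain ⟨hmem, hmin⟩ := ih (if pvLt q e then q else e)
    simp only [List.foldl_cons]
    set r := t.foldl (fun best p => if pvLt p best then p else best) (if pvLt q e then q else e) with hr
    by_cases hqe : pvLt q e = true
    · rw [if_pos hqe] at hmem hmin
      refine ⟨?_, ?_⟩
      · rcases List.mem_cons.mp hmem with h | h
        · simp [h]
        · simp [List.mem_cons.mpr (Or.inr (List.mem_cons.mpr (Or.inr h)))]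
      · intro p hp
        have hq : pvLt q r = false := hmin q (List.mem_cons_self ..)
        rcases List.mem_cons.mp hp with hpe | hp'
        · subst hpe
          by_contra hc
          have he : pvLt p r = true := by cases h : pvLt p r <;> simp_all
          exact absurd (pvLt_trans hqe he) (by simp [hq])
        · exact hmin p hp'
    · have hqe' : pvLt q e = false := by cases h : pvLt q e <;> simp_all
      rw [if_neg (by simp [hqe'])] at hmem hmin
      refine ⟨?_, ?_⟩
      · rcases List.mem_cons.mp hmem with h | h
        · simp [h]
        · simp [List.mem_cons.mpr (Or.inr (List.mem_cons.mpr (Or.inr h)))]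
      · intro p hp
        have hee : pvLt e r = false := hmin e (List.mem_cons_self ..)
        rcases List.mem_cons.mp hp with hpe | hp'
        · subst hpe; exact hee
        · rcases List.mem_cons.mp hp' with hpq | hp''
          · subst hpq
            by_contra hc
            have hq : pvLt p r = true := by cases h : pvLt p r <;> simp_all
            exact absurd (pvLt_of_not_of_lt hqe' hq) (by simp [hee])
          · exact hmin p (List.mem_cons.mpr (Or.inr hp''))

-- B's loop invariant: after scanning range(1, k), best is the first key-maximal vertex of [0, k)
theorem pvArgmax_spec (K : Int → Int × Int) (k : Nat) (hk : 1 ≤ k) :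
    let b := (PySem.List.pyRange 1 (k : Int) 1).foldl
      (fun best v => if pvLt (K best) (K v) then v else best) 0
    0 ≤ b ∧ b < (k : Int) ∧
    (∀ v : Int, 0 ≤ v → v < (k : Int) → pvLt (K b) (K v) = false) ∧
    (∀ v : Int, 0 ≤ v → v < b → pvLt (K v) (K b) = true) := by
  induction k with
  | zero => omega
  | succ k ih =>
    by_cases hk1 : 1 ≤ k
    · have hsplit : PySem.List.pyRange 1 ((k + 1 : Nat) : Int) 1
          = PySem.List.pyRange 1 (k : Int) 1 ++ [(k : Int)] := by
        push_cast
        exact PySem.List.pyRange_one_succ_right (by exact_mod_cast hk1)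
      obtain ⟨hb0, hbk, hmax, hstrict⟩ := ih hk1
      set b := (PySem.List.pyRange 1 (k : Int) 1).foldl
        (fun best v => if pvLt (K best) (K v) then v else best) 0 with hbdef
      simp only [hsplit, List.foldl_append, List.foldl_cons, List.foldl_nil, ← hbdef]
      by_cases hlt : pvLt (K b) (K (k : Int)) = true
      · simp only [hlt, if_true]
        refine ⟨by positivity, by push_cast; omega, ?_, ?_⟩
        · intro v hv0 hvk
          push_cast at hvk
          by_cases hveq : v = (k : Int)
          · subst hveq; exact pvLt_irrefl _
          · have hv : v < (k : Int) := by omega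
            have h1 := hmax v hv0 hv
            by_contra hc
            have h2 : pvLt (K (k:Int)) (K v) = true := by
              cases h : pvLt (K (k:Int)) (K v) <;> simp_all
            exact absurd (pvLt_trans hlt h2) (by simp [h1])
        · intro v hv0 hvk
          exact pvLt_of_not_of_lt (hmax v hv0 hvk) hlt
      · have hlt' : pvLt (K b) (K (k : Int)) = false := by
          cases h : pvLt (K b) (K (k:Int)) <;> simp_all
        simp only [hlt', Bool.false_eq_true, if_false]
        refine ⟨hb0, by push_cast; omega, ?_, hstrict⟩
        intro v hv0 hvk
        push_cast at hvk
        by_cases hveq : v = (k : Int)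
        · subst hveq; exact hlt'
        · exact hmax v hv0 (by omega)
    · -- k = 0 : range(1, 1) is empty, best = 0
      have hk0 : k = 0 := by omega
      subst hk0
      have : PySem.List.pyRange 1 ((1 : Nat) : Int) 1 = [] :=
        PySem.List.pyRange_one_eq_nil (by norm_num)
      rw [show ((0 + 1 : Nat) : Int) = ((1 : Nat) : Int) by norm_num, this]
      simp only [List.foldl_nil]
      refine ⟨le_refl 0, by norm_num, ?_, by intro v h1 h2; omega⟩
      intro v hv0 hv1
      have : v = 0 := by omega
      subst this; exact pvLt_irrefl _


-- pvArgmax_spec with the let-binding expanded (the form pvMain consumes)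
theorem pvArgmax_spec' (K : Int → Int × Int) (k : Nat) (hk : 1 ≤ k) (b : Int)
    (hb : (PySem.List.pyRange 1 (k : Int) 1).foldl
        (fun best v => if pvLt (K best) (K v) then v else best) 0 = b) :
    0 ≤ b ∧ b < (k : Int) ∧
    (∀ v : Int, 0 ≤ v → v < (k : Int) → pvLt (K b) (K v) = false) ∧
    (∀ v : Int, 0 ≤ v → v < b → pvLt (K v) (K b) = true) := by
  subst hb; exact pvArgmax_spec K k hk

-- the heart of the equivalence: A's select-and-break-ties equals B's single argmax pass
theorem pvMain (graph : List (List Int)) (ver : List Int)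
    (hlen : ver.length = graph.length) (hn1 : 1 ≤ graph.length)
    (m : Int) (hm : PySem.List.max? ver (fun x => x) = some m) :
    (if (List.foldl (fun acc i => if PySem.List.pyGetD ver i 0 = m then acc ++ [i] else acc) []
          (PySem.List.pyRange 0 (PySem.List.len ver) 1)).length = 1
     then PySem.List.pyGetD (List.foldl (fun acc i => if PySem.List.pyGetD ver i 0 = m then acc ++ [i] else acc) []
          (PySem.List.pyRange 0 (PySem.List.len ver) 1)) 0 0
     else pvCountEdges graph (List.foldl (fun acc i => if PySem.List.pyGetD ver i 0 = m then acc ++ [i] else acc) []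
          (PySem.List.pyRange 0 (PySem.List.len ver) 1)))
    = List.foldl (fun best v => if pvLt (pvKey graph ver best) (pvKey graph ver v) then v else best) 0
        (PySem.List.pyRange 1 (graph.length : Int) 1) := by
  have hmmax : ∀ y ∈ ver, y ≤ m := PySem.List.max?_isMax hm
  rw [PySem.List.len_eq, hlen]
  generalize hMVg : List.foldl (fun acc i => if PySem.List.pyGetD ver i 0 = m then acc ++ [i] else acc)
      [] (PySem.List.pyRange 0 (graph.length : Int) 1) = MV
  generalize hbg : List.foldl (fun best v => if pvLt (pvKey graph ver best) (pvKey graph ver v) then v else best)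
      0 (PySem.List.pyRange 1 (graph.length : Int) 1) = b
  obtain ⟨hb0, hbn, hmaxB, hstrictB⟩ := pvArgmax_spec' (pvKey graph ver) graph.length hn1 b hbg
  have hfilter : MV = (PySem.List.pyRange 0 (graph.length : Int) 1).filter
      (fun i => decide (PySem.List.pyGetD ver i 0 = m)) := by
    rw [← hMVg]
    simpa using PySem.List.foldl_append_ite (fun i => PySem.List.pyGetD ver i 0 = m)
      (fun (i : Int) => i) (PySem.List.pyRange 0 (graph.length : Int) 1) ([] : List Int)
  have hmemMV : ∀ i : Int, i ∈ MV ↔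
      ((0 ≤ i ∧ i < (graph.length : Int)) ∧ PySem.List.pyGetD ver i 0 = m) := by
    intro i
    rw [hfilter]
    simp [List.mem_filter, PySem.List.mem_pyRange_one]
  -- every in-range entry is ≤ m
  have hub : ∀ v : Int, 0 ≤ v → v < (graph.length : Int) → PySem.List.pyGetD ver v 0 ≤ m := by
    intro v h0 h1
    refine hmmax _ (PySem.List.pyGetD_mem ver 0 ?_)
    show -((ver.length : Int)) ≤ v ∧ v < (ver.length : Int)
    constructor
    · exact le_trans (by simp) h0
    · rw [hlen]; exact h1
  -- m is attained at some in-range index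
  have hattain : ∃ j : Int, (0 ≤ j ∧ j < (graph.length : Int)) ∧ PySem.List.pyGetD ver j 0 = m := by
    obtain ⟨k, hk, hkm⟩ := List.mem_iff_getElem.mp (PySem.List.max?_mem hm)
    refine ⟨(k : Int), ⟨by positivity, ?_⟩, ?_⟩
    · rw [← hlen]; exact_mod_cast hk
    · rw [PySem.List.pyGetD_natCast]
      rw [List.getD_eq_getElem?_getD, List.getElem?_eq_getElem hk]
      simpa using hkm
  -- B's winner carries the maximal bridge count
  have hbfst : PySem.List.pyGetD ver b 0 = m := by
    obtain ⟨j, ⟨hj0, hjn⟩, hjm⟩ := hattain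
    have h1 := hmaxB j hj0 hjn
    simp only [pvLt, pvKey] at h1
    have h2 := hub b hb0 hbn
    simp at h1
    omega
  have hbMV : b ∈ MV := (hmemMV b).mpr ⟨⟨hb0, hbn⟩, hbfst⟩
  by_cases hone : MV.length = 1
  · -- unique candidate: A returns it directly, and B's winner is that candidate
    obtain ⟨c, hc⟩ := List.length_eq_one_iff.mp hone
    rw [if_pos hone, hc]
    rw [hc] at hbMV
    simp only [List.mem_singleton] at hbMV
    rw [PySem.List.pyGetD_zero_cons, hbMV]
  · rw [if_neg hone]
    cases hMVc : MV with
    | nil => rw [hMVc] at hbMV; simp at hbMV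
    | cons c rest =>
      unfold pvCountEdges
      rw [PySem.List.foldl_append_singleton_eq_map (fun v => (-(pvDeg graph v), v))]
      show (List.foldl (fun best p => if pvLt p best then p else best) (-(pvDeg graph c), c)
          (List.map (fun v => (-(pvDeg graph v), v)) rest)).2 = b
      have Hmin := pvMinFold_spec (rest.map (fun v => (-(pvDeg graph v), v))) (-(pvDeg graph c), c)
      set rmin := (rest.map (fun v => (-(pvDeg graph v), v))).foldl
          (fun best p => if pvLt p best then p else best) (-(pvDeg graph c), c) with hrmindef
      obtain ⟨hrmem, hrmin⟩ := Hmin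
      have hrmem' : rmin ∈ (c :: rest).map (fun v => (-(pvDeg graph v), v)) := by
        simpa using hrmem
      obtain ⟨rv, hrvMV, hrveq⟩ := List.mem_map.mp hrmem'
      have hrv0n := (hmemMV rv).mp (hMVc ▸ hrvMV)
      have hbMV' : b ∈ c :: rest := hMVc ▸ hbMV
      have hmemb := List.mem_map_of_mem (f := fun v => (-(pvDeg graph v), v)) hbMV'
      rw [List.map_cons] at hmemb
      have hminb := hrmin ((fun v => (-(pvDeg graph v), v)) b) hmemb
      rw [← hrveq]
      rw [← hrveq] at hminb
      have hBr := hmaxB rv hrv0n.1.1 hrv0n.1.2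
      -- unravel the two lexicographic facts and conclude rmin.2 = rv = b
      simp only [pvLt, pvKey, hbfst, hrv0n.2] at hminb hBr
      simp at hminb hBr
      have hdege : pvDeg graph rv = pvDeg graph b ∧ rv ≤ b := by
        constructor <;> omega
      rcases lt_or_eq_of_le hdege.2 with hlt | heq
      · have hst := hstrictB rv hrv0n.1.1 hlt
        simp only [pvLt, pvKey, hbfst, hrv0n.2] at hst
        simp at hst
        exfalso
        omega
      · simpa using heq

-- ===== VERDICT (by name: the statement is the Claim_ definition above) =====
theorem give_me_right_vertex_spec : Claim_equal_give_me_right_vertex := by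
  intro graph bridges _ hpre
  obtain ⟨hne, _hrows, _hbr⟩ := hpre
  unfold Spec_give_me_right_vertex
  simp only [give_me_right_vertex, give_me_right_vertex_alt]
  have hlen := pvVer_length graph bridges
  have hn1 : 1 ≤ graph.length := List.length_pos_iff.mpr hne
  have hver_ne : pvVer graph bridges ≠ [] := by
    intro h; rw [h] at hlen; simp at hlen; omega
  obtain ⟨m, hm⟩ : ∃ m, PySem.List.max? (pvVer graph bridges) (fun x => x) = some m := by
    cases h : PySem.List.max? (pvVer graph bridges) (fun x => x) with
    | none => exact absurd ((PySem.List.max?_eq_none_iff _ _).mp h) hver_ne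
    | some m => exact ⟨m, rfl⟩
  rw [hm]
  simp only [Option.getD_some]
  exact pvMain graph (pvVer graph bridges) hlen hn1 m hm
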